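-- pv_equiv track=rewrite | github.com/furuhama/advent_of_code | day3/check_step_in_spiral.py | check_index_value
-- ===== SOURCE A (Python) =====
-- import math
--
-- def check_nearest_odd_sq_num(n):
--     """
--     in this spiral, each spiral ends with a square of odd number
--     so, get which odd number spiral the target is in
--     """
--     i = 1
--     while i ** 2 < n:
--         i += 2
--     # i is definitely odd number
--     return i
--
-- def check_index_value(index):
--     if index == 1:
--         return 1
--     elif index == 2:
--         return 1
--     elif index == 3:
--         return 2
--     elif index == 4:
--         return 4
--     elif index == 5:
--         return 5
--     elif index == 6:
--         return 10
--     else: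
--         circle = (check_nearest_odd_sq_num(index) + 1) // 2
--         # max_step is length of each direction steps
--         max_step = (circle - 1) * 2
--         extra_steps = index - ((circle - 1) * 2 - 1) ** 2
--         # direction is which side the index is in (it returns 1 to 4)
--         direction = math.ceil(extra_steps / max_step)
--         steps = extra_steps - (direction - 1) * max_step
--
--         def matrix_to_index(circle, direction, steps):
--             if circle == 1:
--                 return 1
--             else:
--                 base_index = ((circle - 1) * 2 - 1) ** 2
--                 max_steps = (circle - 1) * 2
--                 extra_index = max_steps * (direction - 1) + steps
--                 return base_index + extra_index
--
--         if steps == 1: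
--             if direction == 1:
--                 return check_index_value(index - 1) + check_index_value(matrix_to_index(circle - 1, 1, 1))
--             else:
--                 inside_index = matrix_to_index(
--                     circle - 1, direction - 1, (circle - 2) * 2)
--                 return check_index_value(index - 1) + check_index_value(index - 2) + check_index_value(inside_index) + check_index_value(inside_index + 1)
--         elif steps == max_step:
--             inside_slant_index = matrix_to_index(
--                 circle - 1, direction, steps - 2)
--             if direction != 4:
--                 return check_index_value(index - 1) + check_index_value(inside_slant_index)
--             else:
--                 circle_first_index = matrix_to_index(circle, 1, 1)
--                 return check_index_value(index - 1) + check_index_value(inside_slant_index) + check_index_value(circle_first_index)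
--         elif steps == max_step - 1:
--             inside_index = matrix_to_index(circle - 1, direction, steps - 1)
--             if direction != 4:
--                 return check_index_value(index - 1) + check_index_value(inside_index) + check_index_value(inside_index - 1)
--             else:
--                 return check_index_value(index - 1) + check_index_value(inside_index) + check_index_value(inside_index - 1) + check_index_value(inside_index + 1)
--         elif steps == 2 and direction == 1:
--             inside_index = matrix_to_index(circle - 1, 1, 1)
--             return check_index_value(index - 1) + check_index_value(index - 2) + check_index_value(inside_index) + check_index_value(inside_index + 1)
--         else:
--             inside_index = matrix_to_index(circle - 1, direction, steps - 1)
--             return check_index_value(index - 1) + check_index_value(inside_index - 1) + check_index_value(inside_index) + check_index_value(inside_index + 1)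
-- ===== SOURCE B (Python) =====
-- def check_index_value(index):
--     # Bottom-up DP: fill values 1..index once, each from already-computed table
--     # entries; the odd ring number k is tracked incrementally instead of being
--     # recomputed by a search loop at every recursive call.
--     vals = [0, 1, 1, 2, 4, 5, 10]
--     k = 3
--     for i in range(7, index + 1):
--         if i > k * k:
--             k += 2
--         vals.append(sum(vals[j] for j in _deps(i, k)))
--     return vals[index]
--
--
-- def _matrix_to_index(circle, direction, steps):
--     if circle == 1:
--         return 1
--     return ((circle - 1) * 2 - 1) ** 2 + (circle - 1) * 2 * (direction - 1) + steps
--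
--
-- def _deps(i, k):
--     """Indices whose values sum to the value at index i (i >= 7, (k-2)^2 < i <= k^2, k odd)."""
--     circle = (k + 1) // 2
--     max_step = k - 1
--     extra = i - (k - 2) ** 2
--     direction = -(-extra // max_step)  # exact ceiling division
--     steps = extra - (direction - 1) * max_step
--     if steps == 1:
--         if direction == 1:
--             return [i - 1, _matrix_to_index(circle - 1, 1, 1)]
--         inside = _matrix_to_index(circle - 1, direction - 1, (circle - 2) * 2)
--         return [i - 1, i - 2, inside, inside + 1]
--     if steps == max_step:
--         slant = _matrix_to_index(circle - 1, direction, steps - 2)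
--         if direction != 4:
--             return [i - 1, slant]
--         return [i - 1, slant, _matrix_to_index(circle, 1, 1)]
--     if steps == max_step - 1:
--         inside = _matrix_to_index(circle - 1, direction, steps - 1)
--         if direction != 4:
--             return [i - 1, inside, inside - 1]
--         return [i - 1, inside, inside - 1, inside + 1]
--     if steps == 2 and direction == 1:
--         inside = _matrix_to_index(circle - 1, 1, 1)
--         return [i - 1, i - 2, inside, inside + 1]
--     inside = _matrix_to_index(circle - 1, direction, steps - 1)
--     return [i - 1, inside - 1, inside, inside + 1]
-- ===== Notes on version B (the rewrite author's own statement) =====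
-- stated objective: faster
-- what changed: Replaces A's naive exponential recursion by a bottom-up dynamic program that fills the table of values 1..index once in order (tracking the spiral's odd ring number incrementally instead of re-running the odd-square search loop at every call), so each value is computed once from at most four table lookups.
-- outside the precondition, e.g. on check_index_value(0): A raises ZeroDivisionError, B returns 0
import Mathlib
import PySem

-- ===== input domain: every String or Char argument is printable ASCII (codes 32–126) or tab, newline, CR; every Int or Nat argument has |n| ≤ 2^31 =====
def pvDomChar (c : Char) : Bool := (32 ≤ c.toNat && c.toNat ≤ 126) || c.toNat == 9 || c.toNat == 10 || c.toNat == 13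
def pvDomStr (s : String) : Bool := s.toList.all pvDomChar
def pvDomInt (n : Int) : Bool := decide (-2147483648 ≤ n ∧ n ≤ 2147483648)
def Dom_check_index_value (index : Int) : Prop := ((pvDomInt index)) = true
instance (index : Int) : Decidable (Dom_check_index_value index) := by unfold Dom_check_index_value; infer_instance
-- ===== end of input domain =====

-- B replaces A's exponential recursion by a bottom-up table of the values 1..index.

-- ===== PORT A =====
-- while loop of check_nearest_odd_sq_num: i = 1; while i**2 < n: i += 2; return i
def check_nearest_go (i n : Int) : Int :=
  if i ^ 2 < n then check_nearest_go (i + 2) n else i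
termination_by (n - i).toNat
decreasing_by
  have h2 : i < n := by nlinarith [sq_nonneg i, sq_nonneg (i - 1)]
  omega

def check_nearest_odd_sq_num (n : Int) : Int := check_nearest_go 1 n

def matrix_to_index (circle direction steps : Int) : Int :=
  if circle = 1 then 1
  else ((circle - 1) * 2 - 1) ^ 2 + (circle - 1) * 2 * (direction - 1) + steps

-- A's recursion, with a fuel guard making the same computation total (fuel only
-- bounds the recursion depth; check_index_value supplies enough of it, as proved below).
-- math.ceil(a / b) is ported as the exact ceiling -((-a) // b): exact on the admitted
-- int domain, where the float quotient is far too close to the true value to mis-round.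
def aGo : Nat → Int → Int
  | 0, _ => 0
  | f + 1, index =>
    if index = 1 then 1
    else if index = 2 then 1
    else if index = 3 then 2
    else if index = 4 then 4
    else if index = 5 then 5
    else if index = 6 then 10
    else
      let circle := PySem.Int.floordiv (check_nearest_odd_sq_num index + 1) 2
      let max_step := (circle - 1) * 2
      let extra_steps := index - ((circle - 1) * 2 - 1) ^ 2
      let direction := -(PySem.Int.floordiv (-extra_steps) max_step)
      let steps := extra_steps - (direction - 1) * max_step
      if steps = 1 then
        if direction = 1 then
          aGo f (index - 1) + aGo f (matrix_to_index (circle - 1) 1 1)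
        else
          let inside_index := matrix_to_index (circle - 1) (direction - 1) ((circle - 2) * 2)
          aGo f (index - 1) + aGo f (index - 2) + aGo f inside_index + aGo f (inside_index + 1)
      else if steps = max_step then
        let inside_slant_index := matrix_to_index (circle - 1) direction (steps - 2)
        if direction ≠ 4 then
          aGo f (index - 1) + aGo f inside_slant_index
        else
          aGo f (index - 1) + aGo f inside_slant_index + aGo f (matrix_to_index circle 1 1)
      else if steps = max_step - 1 then
        let inside_index := matrix_to_index (circle - 1) direction (steps - 1)
        if direction ≠ 4 then
          aGo f (index - 1) + aGo f inside_index + aGo f (inside_index - 1)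
        else
          aGo f (index - 1) + aGo f inside_index + aGo f (inside_index - 1) + aGo f (inside_index + 1)
      else if steps = 2 ∧ direction = 1 then
        let inside_index := matrix_to_index (circle - 1) 1 1
        aGo f (index - 1) + aGo f (index - 2) + aGo f inside_index + aGo f (inside_index + 1)
      else
        let inside_index := matrix_to_index (circle - 1) direction (steps - 1)
        aGo f (index - 1) + aGo f (inside_index - 1) + aGo f inside_index + aGo f (inside_index + 1)

def check_index_value (index : Int) : Int := aGo (index.toNat + 1) index

-- ===== PORT B =====
def bMtx (circle direction steps : Int) : Int :=
  if circle = 1 then 1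
  else ((circle - 1) * 2 - 1) ^ 2 + (circle - 1) * 2 * (direction - 1) + steps

-- _deps(i, k): the indices whose table entries sum to the value at index i
def bDeps (i k : Int) : List Int :=
  let circle := PySem.Int.floordiv (k + 1) 2
  let max_step := k - 1
  let extra := i - (k - 2) ^ 2
  let direction := -(PySem.Int.floordiv (-extra) max_step)
  let steps := extra - (direction - 1) * max_step
  if steps = 1 then
    if direction = 1 then [i - 1, bMtx (circle - 1) 1 1]
    else
      let inside := bMtx (circle - 1) (direction - 1) ((circle - 2) * 2)
      [i - 1, i - 2, inside, inside + 1]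
  else if steps = max_step then
    let slant := bMtx (circle - 1) direction (steps - 2)
    if direction ≠ 4 then [i - 1, slant]
    else [i - 1, slant, bMtx circle 1 1]
  else if steps = max_step - 1 then
    let inside := bMtx (circle - 1) direction (steps - 1)
    if direction ≠ 4 then [i - 1, inside, inside - 1]
    else [i - 1, inside, inside - 1, inside + 1]
  else if steps = 2 ∧ direction = 1 then
    let inside := bMtx (circle - 1) 1 1
    [i - 1, i - 2, inside, inside + 1]
  else
    let inside := bMtx (circle - 1) direction (steps - 1)
    [i - 1, inside - 1, inside, inside + 1]

-- the for-loop: n remaining iterations, current index i, current odd ring number k.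
-- Python's list is an array; vals.append(x) is vals.push x, and the reads vals[j]
-- (always with 0 ≤ j < len(vals) here) are the O(1) Array.getD.
def bGo : Nat → Int → Int → Array Int → Array Int
  | 0, _, _, vals => vals
  | n + 1, i, k, vals =>
    let k' := if i > k * k then k + 2 else k
    let v := ((bDeps i k').map (fun j => vals.getD j.toNat 0)).sum
    bGo n (i + 1) k' (vals.push v)

def check_index_value_alt (index : Int) : Int :=
  let vals := bGo (index + 1 - 7).toNat 7 3 #[0, 1, 1, 2, 4, 5, 10]
  (PySem.List.pyGet? vals.toList index).getD 0

-- ===== PRECONDITION & SPEC =====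
-- Pre_ excludes exactly index ≤ 0, where A raises ZeroDivisionError (max_step = 0).
def Pre_check_index_value (index : Int) : Prop := 1 ≤ index
instance (index : Int) : Decidable (Pre_check_index_value index) := by
  unfold Pre_check_index_value; infer_instance

def pvWitness_check_index_value : Int := 7

def Spec_check_index_value (index : Int) (out : Int) : Prop := out = check_index_value_alt index
instance (index : Int) (out : Int) : Decidable (Spec_check_index_value index out) := by
  unfold Spec_check_index_value; infer_instance

-- ===== CLAIM (what is proved, stated in full; the proofs are below) =====
def Claim_equal_check_index_value : Prop :=
  ∀ (index : Int), Dom_check_index_value index → Pre_check_index_value index →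
    Spec_check_index_value index (check_index_value index)

-- ===== LEMMAS AND PROOFS =====

-- characterisation of the while loop of check_nearest_odd_sq_num
theorem check_nearest_go_spec (i n : Int) (hi : 1 ≤ i) (hodd : i % 2 = 1)
    (hpr : i = 1 ∨ (i - 2) ^ 2 < n) :
    1 ≤ check_nearest_go i n ∧ check_nearest_go i n % 2 = 1 ∧
      n ≤ check_nearest_go i n ^ 2 ∧
      (check_nearest_go i n = 1 ∨ (check_nearest_go i n - 2) ^ 2 < n) := by
  rw [check_nearest_go]
  split_ifs with h
  · exact check_nearest_go_spec (i + 2) n (by omega) (by omega)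
      (Or.inr (by simpa using h))
  · exact ⟨hi, hodd, by linarith, hpr⟩
termination_by (n - i).toNat
decreasing_by
  have h2 : i < n := by nlinarith [sq_nonneg i, sq_nonneg (i - 1)]
  omega

theorem ring_unique (n k1 k2 : Int) (h2 : 2 ≤ n)
    (hk1 : 1 ≤ k1) (ho1 : k1 % 2 = 1) (hu1 : n ≤ k1 ^ 2) (hl1 : k1 = 1 ∨ (k1 - 2) ^ 2 < n)
    (hk2 : 1 ≤ k2) (ho2 : k2 % 2 = 1) (hu2 : n ≤ k2 ^ 2) (hl2 : k2 = 1 ∨ (k2 - 2) ^ 2 < n) :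
    k1 = k2 := by
  have e1 : k1 ≠ 1 := by rintro rfl; norm_num at hu1; omega
  have e2 : k2 ≠ 1 := by rintro rfl; norm_num at hu2; omega
  have hl1' := hl1.resolve_left e1
  have hl2' := hl2.resolve_left e2
  by_contra hne
  rcases lt_or_gt_of_ne hne with h | h
  · have hle : k1 ≤ k2 - 2 := by omega
    have : k1 ^ 2 ≤ (k2 - 2) ^ 2 := by nlinarith
    omega
  · have hle : k2 ≤ k1 - 2 := by omega
    have : k2 ^ 2 ≤ (k1 - 2) ^ 2 := by nlinarith
    omega

theorem bMtx_lb (g d t : Int) (h1 : 1 ≤ g) (hd : 1 ≤ d) (ht : 0 ≤ t) :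
    1 ≤ bMtx g d t := by
  unfold bMtx; split_ifs with h
  · omega
  · have h2 : 2 ≤ g := by omega
    nlinarith [sq_nonneg ((g - 1) * 2 - 2),
      mul_nonneg (by omega : (0:Int) ≤ (g - 1) * 2) (by omega : (0:Int) ≤ d - 1)]

theorem bMtx_lb2 (g d t : Int) (h1 : 2 ≤ g) (hd : 1 ≤ d) (ht : 1 ≤ t) :
    2 ≤ bMtx g d t := by
  unfold bMtx; split_ifs with h
  · omega
  · have h2 : 2 ≤ g := by omega
    nlinarith [sq_nonneg ((g - 1) * 2 - 2),
      mul_nonneg (by omega : (0:Int) ≤ (g - 1) * 2) (by omega : (0:Int) ≤ d - 1)]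

theorem bMtx_ub (g d t : Int) (h1 : 1 ≤ g) (hd1 : 1 ≤ d) (hd : d ≤ 4)
    (hs : g = 1 ∨ t ≤ (g - 1) * 2) : bMtx g d t ≤ (2 * g - 1) ^ 2 := by
  unfold bMtx; split_ifs with h
  · nlinarith [sq_nonneg (2 * g - 1)]
  · rcases hs with h' | hs
    · exact absurd h' h
    · have h2 : 2 ≤ g := by omega
      nlinarith [mul_nonneg (by omega : (0:Int) ≤ (g - 1) * 2) (by omega : (0:Int) ≤ 4 - d)]

theorem bMtx_ub2 (g d t : Int) (h1 : 2 ≤ g) (hd1 : 1 ≤ d) (hd : d ≤ 4)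
    (hs : t ≤ (g - 1) * 2 - 1) : bMtx g d t ≤ (2 * g - 1) ^ 2 - 1 := by
  unfold bMtx; split_ifs with h
  · omega
  · nlinarith [mul_nonneg (by omega : (0:Int) ≤ (g - 1) * 2) (by omega : (0:Int) ≤ 4 - d)]

theorem deps_bounds (i k : Int) (hi : 7 ≤ i) (hk : 3 ≤ k) (hodd : k % 2 = 1)
    (hlo : (k - 2) ^ 2 < i) (hhi : i ≤ k ^ 2) :
    ∀ j ∈ bDeps i k, 1 ≤ j ∧ j < i := by
  intro j hj
  have hc : PySem.Int.floordiv (k + 1) 2 = (k + 1) / 2 :=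
    PySem.Int.floordiv_eq_ediv_of_pos (by norm_num)
  simp only [bDeps, hc] at hj
  have hmax : (0 : Int) < k - 1 := by omega
  set D := -PySem.Int.floordiv (-(i - (k - 2) ^ 2)) (k - 1) with hDdef
  obtain ⟨hd1, hd2⟩ := (PySem.Int.neg_floordiv_neg_eq_iff_of_pos hmax).mp hDdef.symm
  set S := i - (k - 2) ^ 2 - (D - 1) * (k - 1) with hSdef
  set C := (k + 1) / 2 with hCdef
  have hkk : k = 2 * C - 1 := by omega
  clear_value D S C
  subst hkk
  have hC2 : 2 ≤ C := by omega
  have hsq : (2 * C - 1 : Int) ^ 2 = (2 * C - 1 - 2) ^ 2 + (8 * C - 8) := by ring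
  have hexhi : i - (2 * C - 1 - 2) ^ 2 ≤ 8 * C - 8 := by linarith
  have hexlo : 1 ≤ i - (2 * C - 1 - 2) ^ 2 := by linarith
  have hD4 : D ≤ 4 := by nlinarith
  have hD1 : 1 ≤ D := by nlinarith
  have hS1 : 1 ≤ S := by
    have : 0 < S := by linarith
    omega
  have hSm : S ≤ 2 * C - 2 := by linarith
  clear hDdef hCdef hc hmax hodd hk hhi hsq hd1 hd2
  by_cases h1 : S = 1
  · rw [if_pos h1] at hj
    by_cases h2 : D = 1
    · subst h2
      rw [if_pos rfl] at hj
      simp only [List.mem_cons, List.not_mem_nil, or_false] at hj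
      have hb := bMtx_lb (C - 1) 1 1 (by omega) le_rfl (by omega)
      have hu := bMtx_ub (C - 1) 1 1 (by omega) le_rfl (by omega) (by omega)
      rcases hj with rfl | rfl <;> constructor <;> linarith
    · rw [if_neg h2] at hj
      simp only [List.mem_cons, List.not_mem_nil, or_false] at hj
      have hb := bMtx_lb (C - 1) (D - 1) ((C - 2) * 2) (by omega) (by omega) (by omega)
      have hu := bMtx_ub (C - 1) (D - 1) ((C - 2) * 2) (by omega) (by omega) (by omega)
        (by omega)
      have hprod := mul_nonneg (by omega : (0:Int) ≤ D - 2) (by omega : (0:Int) ≤ 2 * C - 1 - 1)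
      rcases hj with rfl | rfl | rfl | rfl <;> constructor <;> linarith
  · rw [if_neg h1] at hj
    by_cases h3 : S = 2 * C - 1 - 1
    · rw [if_pos h3] at hj
      have hb := bMtx_lb (C - 1) D (S - 2) (by omega) (by omega) (by omega)
      have hu := bMtx_ub (C - 1) D (S - 2) (by omega) (by omega) (by omega) (by omega)
      by_cases h4 : D ≠ 4
      · rw [if_pos h4] at hj
        simp only [List.mem_cons, List.not_mem_nil, or_false] at hj
        rcases hj with rfl | rfl <;> constructor <;> linarith
      · rw [if_neg h4] at hj
        have hD4' : D = 4 := by omega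
        subst hD4'
        simp only [List.mem_cons, List.not_mem_nil, or_false] at hj
        have he : bMtx C 1 1 = ((C - 1) * 2 - 1) ^ 2 + (C - 1) * 2 * (1 - 1) + 1 :=
          if_neg (by omega)
        rcases hj with rfl | rfl | rfl <;> constructor <;> linarith
    · rw [if_neg h3] at hj
      by_cases h5 : S = 2 * C - 1 - 1 - 1
      · rw [if_pos h5] at hj
        have hC3 : 3 ≤ C := by omega
        have hb := bMtx_lb2 (C - 1) D (S - 1) (by omega) (by omega) (by omega)
        have hu := bMtx_ub (C - 1) D (S - 1) (by omega) (by omega) (by omega) (by omega)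
        by_cases h4 : D ≠ 4
        · rw [if_pos h4] at hj
          simp only [List.mem_cons, List.not_mem_nil, or_false] at hj
          rcases hj with rfl | rfl | rfl <;> constructor <;> linarith
        · rw [if_neg h4] at hj
          have hD4' : D = 4 := by omega
          subst hD4'
          simp only [List.mem_cons, List.not_mem_nil, or_false] at hj
          rcases hj with rfl | rfl | rfl | rfl <;> constructor <;> linarith
      · rw [if_neg h5] at hj
        by_cases h6 : S = 2 ∧ D = 1
        · rw [if_pos h6] at hj
          obtain ⟨hS2, hD1'⟩ := h6
          subst hS2; subst hD1'
          have hC3 : 3 ≤ C := by omega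
          simp only [List.mem_cons, List.not_mem_nil, or_false] at hj
          have hb := bMtx_lb (C - 1) 1 1 (by omega) le_rfl (by omega)
          have hu := bMtx_ub2 (C - 1) 1 1 (by omega) le_rfl (by omega) (by omega)
          rcases hj with rfl | rfl | rfl | rfl <;> constructor <;> linarith
        · rw [if_neg h6] at hj
          have hC3 : 3 ≤ C := by omega
          have hS2 : 2 ≤ S := by omega
          have hSm2 : S ≤ 2 * C - 4 := by omega
          simp only [List.mem_cons, List.not_mem_nil, or_false] at hj
          have hb := bMtx_lb2 (C - 1) D (S - 1) (by omega) (by omega) (by omega)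
          have hu := bMtx_ub2 (C - 1) D (S - 1) (by omega) (by omega) (by omega)
            (by omega)
          rcases hj with rfl | rfl | rfl | rfl <;> constructor <;> linarith

-- properties of A's helper value at index ≥ 7
theorem cn_facts (i : Int) (hi : 7 ≤ i) :
    3 ≤ check_nearest_odd_sq_num i ∧ check_nearest_odd_sq_num i % 2 = 1 ∧
      (check_nearest_odd_sq_num i - 2) ^ 2 < i ∧ i ≤ check_nearest_odd_sq_num i ^ 2 := by
  obtain ⟨h1, h2, h3, h4⟩ := check_nearest_go_spec 1 i (by omega) (by decide) (Or.inl rfl)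
  unfold check_nearest_odd_sq_num
  have hne : check_nearest_go 1 i ≠ 1 := by
    rintro e; rw [e] at h3; norm_num at h3; omega
  exact ⟨by omega, h2, h4.resolve_left hne, h3⟩

-- one unfolding of A's recursion, written as a sum over bDeps
theorem abody (f : Nat) (i : Int) (hi : 7 ≤ i) :
    aGo (f + 1) i = ((bDeps i (check_nearest_odd_sq_num i)).map (aGo f)).sum := by
  obtain ⟨hk3, hodd, hlo, hhi⟩ := cn_facts i hi
  set K := check_nearest_odd_sq_num i with hK
  have hc : PySem.Int.floordiv (K + 1) 2 = (K + 1) / 2 :=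
    PySem.Int.floordiv_eq_ediv_of_pos (by norm_num)
  simp only [aGo, bDeps, ← hK, hc, show bMtx = matrix_to_index from rfl]
  have e1 : ((K + 1) / 2 - 1) * 2 = K - 1 := by omega
  have e3 : (K - 1 : Int) - 1 = K - 2 := by ring
  rw [e1, e3]
  rw [if_neg (show ¬i = 1 by omega), if_neg (show ¬i = 2 by omega),
      if_neg (show ¬i = 3 by omega), if_neg (show ¬i = 4 by omega),
      if_neg (show ¬i = 5 by omega), if_neg (show ¬i = 6 by omega)]
  generalize -PySem.Int.floordiv (-(i - (K - 2) ^ 2)) (K - 1) = D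
  generalize i - (K - 2) ^ 2 - (D - 1) * (K - 1) = S
  generalize (K + 1) / 2 = C
  clear_value K
  by_cases h1 : S = 1
  · simp only [if_pos h1]
    by_cases h2 : D = 1
    · simp only [if_pos h2, List.map_cons, List.map_nil, List.sum_cons, List.sum_nil]; omega
    · simp only [if_neg h2, List.map_cons, List.map_nil, List.sum_cons, List.sum_nil]; omega
  · simp only [if_neg h1]
    by_cases h3 : S = K - 1
    · simp only [if_pos h3]
      by_cases h4 : D ≠ 4
      · simp only [if_pos h4, List.map_cons, List.map_nil, List.sum_cons, List.sum_nil]; omega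
      · simp only [if_neg h4, List.map_cons, List.map_nil, List.sum_cons, List.sum_nil]; omega
    · simp only [if_neg h3]
      by_cases h5 : S = K - 2
      · simp only [if_pos h5]
        by_cases h4 : D ≠ 4
        · simp only [if_pos h4, List.map_cons, List.map_nil, List.sum_cons, List.sum_nil]; omega
        · simp only [if_neg h4, List.map_cons, List.map_nil, List.sum_cons, List.sum_nil]; omega
      · simp only [if_neg h5]
        by_cases h6 : S = 2 ∧ D = 1
        · simp only [if_pos h6, List.map_cons, List.map_nil, List.sum_cons, List.sum_nil]; omega
        · simp only [if_neg h6, List.map_cons, List.map_nil, List.sum_cons, List.sum_nil]; omega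

theorem aGo_fuel (f1 f2 : Nat) (i : Int) (hi : 1 ≤ i)
    (h1 : i.toNat ≤ f1 + 1) (h2 : i.toNat ≤ f2 + 1) :
    aGo (f1 + 1) i = aGo (f2 + 1) i := by
  by_cases h7 : i ≤ 6
  · interval_cases i <;> simp [aGo]
  · have hi7 : 7 ≤ i := by omega
    rw [abody f1 i hi7, abody f2 i hi7]
    apply congrArg List.sum
    apply List.map_congr_left
    intro j hj
    obtain ⟨hk3, hodd, hlo, hhi⟩ := cn_facts i hi7
    obtain ⟨hj1, hj2⟩ := deps_bounds i _ hi7 hk3 hodd hlo hhi j hj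
    have hf1 : f1 = (f1 - 1) + 1 := by omega
    have hf2 : f2 = (f2 - 1) + 1 := by omega
    rw [hf1, hf2]
    exact aGo_fuel (f1 - 1) (f2 - 1) j hj1 (by omega) (by omega)
termination_by i.toNat
decreasing_by omega

def tVal (m : Nat) : Int := if m = 0 then 0 else check_index_value (m : Int)

theorem getD_tbl (m : Nat) (j : Int) (h0 : 0 ≤ j) (hm : j < (m : Int)) :
    Array.getD ((List.range m).map tVal).toArray j.toNat 0 = tVal j.toNat := by
  have hlt : j.toNat < m := by omega
  simp [Array.getD, hlt]

theorem bGo_inv (n : Nat) (i k : Int) (hi : 7 ≤ i) (hk : 3 ≤ k) (hodd : k % 2 = 1)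
    (hlo : (k - 2) ^ 2 < i) (hhi : i ≤ k ^ 2 + 1) :
    bGo n i k ((List.range i.toNat).map tVal).toArray = ((List.range (i.toNat + n)).map tVal).toArray := by
  induction n generalizing i k with
  | zero => simp [bGo]
  | succ n IH =>
    simp only [bGo]
    set k' := if i > k * k then k + 2 else k with hk'def
    have hkk : k * k = k ^ 2 := by ring
    have hk'3 : 3 ≤ k' := by rw [hk'def]; split_ifs <;> omega
    have hk'odd : k' % 2 = 1 := by rw [hk'def]; split_ifs <;> omega
    have hk'lo : (k' - 2) ^ 2 < i := by
      rw [hk'def]; split_ifs with h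
      · nlinarith
      · exact hlo
    have hk'hi : i ≤ k' ^ 2 := by
      rw [hk'def]; split_ifs with h
      · nlinarith
      · omega
    clear_value k'
    obtain ⟨hc3, hcodd, hclo, hchi⟩ := cn_facts i hi
    have hkeq : k' = check_nearest_odd_sq_num i :=
      ring_unique i k' _ (by omega) (by omega) hk'odd hk'hi (Or.inr hk'lo)
        (by omega) hcodd hchi (Or.inr hclo)
    have hbd := deps_bounds i k' hi hk'3 hk'odd hk'lo hk'hi
    have hcast : ((i.toNat : Int)) = i := Int.toNat_of_nonneg (by omega)
    have hv : ((bDeps i k').map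
        (fun j => Array.getD ((List.range i.toNat).map tVal).toArray j.toNat 0)).sum = tVal i.toNat := by
      have hcv : tVal i.toNat = aGo (i.toNat + 1) i := by
        unfold tVal check_index_value
        rw [if_neg (by omega), hcast]
      rw [hcv, abody i.toNat i hi, ← hkeq]
      apply congrArg List.sum
      apply List.map_congr_left
      intro j hj
      obtain ⟨hj1, hj2⟩ := hbd j hj
      rw [getD_tbl i.toNat j (by omega) (by omega)]
      have hjcast : ((j.toNat : Int)) = j := Int.toNat_of_nonneg (by omega)
      have htv : tVal j.toNat = aGo (j.toNat + 1) j := by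
        unfold tVal check_index_value
        rw [if_neg (by omega), hjcast]
      rw [htv, show i.toNat = (i.toNat - 1) + 1 by omega]
      exact aGo_fuel j.toNat (i.toNat - 1) j hj1 (by omega) (by omega)
    rw [hv, show ((List.range i.toNat).map tVal).toArray.push (tVal i.toNat)
          = ((List.range (i.toNat + 1)).map tVal).toArray by
        rw [List.push_toArray]; simp [List.range_succ]]
    have := IH (i + 1) k' (by omega) hk'3 hk'odd (by linarith) (by linarith)
    rw [show (i + 1).toNat = i.toNat + 1 by omega] at this
    rw [this, show i.toNat + 1 + n = i.toNat + (n + 1) by omega]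

theorem check_index_value_spec' (index : Int) (h : 1 ≤ index) :
    check_index_value index = check_index_value_alt index := by
  have h0 : ([0, 1, 1, 2, 4, 5, 10] : List Int) = (List.range 7).map tVal := by decide
  have hb := bGo_inv ((index + 1 - 7).toNat) 7 3 (by norm_num) (by norm_num) (by decide)
    (by norm_num) (by norm_num)
  rw [show ((7 : Int)).toNat = 7 from rfl] at hb
  show check_index_value index =
    (PySem.List.pyGet? (bGo (index + 1 - 7).toNat 7 3 #[0, 1, 1, 2, 4, 5, 10]).toList index).getD 0
  rw [show (#[0, 1, 1, 2, 4, 5, 10] : Array Int) = ([0, 1, 1, 2, 4, 5, 10] : List Int).toArray from rfl,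
    h0, hb, List.toList_toArray]
  have hidx : index.toNat < 7 + (index + 1 - 7).toNat := by omega
  rw [← Int.toNat_of_nonneg (by omega : (0 : Int) ≤ index), PySem.List.pyGet?_natCast]
  have hidx' : index.toNat < 7 + ((index.toNat : Int) + 1 - 7).toNat := by omega
  rw [List.getElem?_map, List.getElem?_range hidx']
  simp only [Option.map_some, Option.getD_some]
  unfold tVal
  rw [if_neg (by omega)]

-- ===== VERDICT (by name: the statement is the Claim_ definition above) =====
theorem check_index_value_spec : Claim_equal_check_index_value := by
  intro index _ hpre
  exact check_index_value_spec' index hpre
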